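-- pv_equiv track=rewrite | github.com/Ta-Ye/CodeTest | Programmers/2020 KAKAO BLIND RECRUITMENT/자물쇠와 열쇠.py | check
-- ===== SOURCE A (Python) =====
-- def check(key,lock):
--     for x in range(len(key)-len(lock)+1):
--         for y in range(len(key)-len(lock)+1):
--             flag=True
--             for xx in range(len(lock)):
--                 for yy in range(len(lock)):
--                     if key[x+xx][y+yy]+lock[xx][yy]!=1:
--                         flag=False
--                         break
--                 if not flag:
--                     break
--             else:
--                 return True
--     else:
--         return False
-- ===== SOURCE B (Python) =====
-- def check(key, lock):
--     # Inverted enumeration: instead of sliding the window and testing cells per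
--     # offset, mark every offset violated by some lock cell in a set, then look
--     # for an unmarked offset.
--     n, m = len(key), len(lock)
--     k = n - m + 1
--     if k <= 0:
--         return False
--     bad = set()
--     for xx in range(m):
--         lrow = lock[xx]
--         for x in range(k):
--             krow = key[x + xx]
--             for yy in range(m):
--                 t = 1 - lrow[yy]
--                 for y in range(k):
--                     if krow[y + yy] != t:
--                         bad.add((x, y))
--     return any((x, y) not in bad for x in range(k) for y in range(k))
-- ===== Notes on version B (the rewrite author's own statement) =====
-- stated objective: alternative
-- what changed: Inverts the enumeration: instead of sliding the window and testing every lock cell per offset with flag/break, B iterates over lock cells in an outer pass, marks every offset they violate in a set of bad offsets, and then scans the offsets for one not in the set.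
-- outside the precondition, e.g. on check([[0, 0], [0, 0]], [[0], [0]]): A returns False, B raises IndexError; on check([[0], [0, 0]], [[1]]): A returns True, B raises IndexError
import Mathlib
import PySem

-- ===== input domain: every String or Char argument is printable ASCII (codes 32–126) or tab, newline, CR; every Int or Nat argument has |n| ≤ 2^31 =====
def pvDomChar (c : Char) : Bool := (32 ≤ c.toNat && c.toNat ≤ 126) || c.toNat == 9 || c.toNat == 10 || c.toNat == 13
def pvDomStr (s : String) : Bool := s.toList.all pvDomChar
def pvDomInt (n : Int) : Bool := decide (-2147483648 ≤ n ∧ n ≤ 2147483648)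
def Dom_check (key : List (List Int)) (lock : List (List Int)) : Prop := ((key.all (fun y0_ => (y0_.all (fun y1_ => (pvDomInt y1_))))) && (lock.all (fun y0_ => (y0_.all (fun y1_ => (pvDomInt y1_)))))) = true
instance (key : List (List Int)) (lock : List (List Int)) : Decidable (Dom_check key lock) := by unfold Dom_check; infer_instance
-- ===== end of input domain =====

-- B inverts A's enumeration: it marks, in one pass over lock cells, every offset they
-- violate in a set of bad offsets, and then scans the offsets for one not in the set
-- (objective: alternative; same asymptotic cost, no early exit).

-- ===== PORT A =====
-- mat[i][j]; inside Pre_check every index reached is in range (Python would raise otherwise)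
def pvCell (mat : List (List Int)) (i j : Int) : Int :=
  PySem.List.pyGetD (PySem.List.pyGetD mat i []) j 0

-- innermost 'for yy' with break: false as soon as a cell fails, true if the loop finishes
def checkYY (key lock : List (List Int)) (x y xx : Int) : List Int → Bool
  | [] => true
  | yy :: rest =>
    if pvCell key (x + xx) (y + yy) + pvCell lock xx yy ≠ 1 then false
    else checkYY key lock x y xx rest

-- 'for xx' with the flag/break: stops at the first failing row
def checkXX (key lock : List (List Int)) (x y : Int) : List Int → Bool
  | [] => true
  | xx :: rest =>
    if checkYY key lock x y xx (PySem.List.pyRange 0 (lock.length : Int) 1)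
    then checkXX key lock x y rest else false

-- 'for y' : the for-else on xx returns True when the xx loop completes
def checkY (key lock : List (List Int)) (x : Int) : List Int → Bool
  | [] => false
  | y :: rest =>
    if checkXX key lock x y (PySem.List.pyRange 0 (lock.length : Int) 1)
    then true else checkY key lock x rest

-- 'for x' with the final for-else returning False
def checkX (key lock : List (List Int)) : List Int → Bool
  | [] => false
  | x :: rest =>
    if checkY key lock x (PySem.List.pyRange 0 ((key.length : Int) - (lock.length : Int) + 1) 1)
    then true else checkX key lock rest

def check (key : List (List Int)) (lock : List (List Int)) : Bool :=
  checkX key lock (PySem.List.pyRange 0 ((key.length : Int) - (lock.length : Int) + 1) 1)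

-- ===== PORT B =====
-- the marking pass: for xx, x, yy, y — add the offset (x, y) to bad when the cell violates
def badSet (key lock : List (List Int)) (m k : Int) : PySem.Set (Int × Int) :=
  (PySem.List.pyRange 0 m 1).foldl (fun s xx =>
    let lrow := PySem.List.pyGetD lock xx []
    (PySem.List.pyRange 0 k 1).foldl (fun s x =>
      let krow := PySem.List.pyGetD key (x + xx) []
      (PySem.List.pyRange 0 m 1).foldl (fun s yy =>
        let t := 1 - PySem.List.pyGetD lrow yy 0
        (PySem.List.pyRange 0 k 1).foldl (fun s y =>
          if PySem.List.pyGetD krow (y + yy) 0 ≠ t then PySem.Set.add s (x, y) else s)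
          s) s) s)
    PySem.Set.empty

def check_alt (key : List (List Int)) (lock : List (List Int)) : Bool :=
  let n : Int := key.length
  let m : Int := lock.length
  let k : Int := n - m + 1
  if k ≤ 0 then false
  else
    let bad := badSet key lock m k
    (PySem.List.pyRange 0 k 1).any (fun x =>
      (PySem.List.pyRange 0 k 1).any (fun y => !(PySem.Set.contains bad (x, y))))

-- ===== PRECONDITION & SPEC =====
-- Pre_ excludes ragged inputs with too-short rows (except where neither version indexes them:
-- lock larger than key, or lock empty): on those the Pythons can raise IndexError (A may also
-- return after an early break; B's marking pass reads every cell and raises — see cites).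
def Pre_check (key : List (List Int)) (lock : List (List Int)) : Prop :=
  key.length < lock.length ∨ lock = [] ∨
    ((∀ row ∈ key, key.length ≤ row.length) ∧ (∀ row ∈ lock, lock.length ≤ row.length))
instance (key : List (List Int)) (lock : List (List Int)) : Decidable (Pre_check key lock) := by
  unfold Pre_check; infer_instance

def pvWitness_check : List (List Int) × List (List Int) := ([[1, 0], [0, 1]], [[0]])

def Spec_check (key : List (List Int)) (lock : List (List Int)) (out : Bool) : Prop := out = check_alt key lock
instance (key : List (List Int)) (lock : List (List Int)) (out : Bool) : Decidable (Spec_check key lock out) := by unfold Spec_check; infer_instance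

-- ===== CLAIM (what is proved, stated in full; the proofs are below) =====
def Claim_equal_check : Prop := ∀ (key : List (List Int)) (lock : List (List Int)), Dom_check key lock → Pre_check key lock → Spec_check key lock (check key lock)

-- ===== LEMMAS AND PROOFS =====

-- A-side loop characterizations
theorem checkYY_eq_all (key lock : List (List Int)) (x y xx : Int) (ys : List Int) :
    checkYY key lock x y xx ys
      = ys.all (fun yy => pvCell key (x + xx) (y + yy) + pvCell lock xx yy == 1) := by
  induction ys with
  | nil => rfl
  | cons h t ih =>
    simp only [checkYY, List.all_cons, ih]
    by_cases hc : pvCell key (x + xx) (y + h) + pvCell lock xx h = 1 <;> simp [hc]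

theorem checkXX_eq_all (key lock : List (List Int)) (x y : Int) (xs : List Int) :
    checkXX key lock x y xs
      = xs.all (fun xx => checkYY key lock x y xx (PySem.List.pyRange 0 (lock.length : Int) 1)) := by
  induction xs with
  | nil => rfl
  | cons h t ih =>
    simp only [checkXX, List.all_cons, ih]
    by_cases hc : checkYY key lock x y h (PySem.List.pyRange 0 (lock.length : Int) 1) = true <;> simp [hc]

theorem checkY_eq_any (key lock : List (List Int)) (x : Int) (ys : List Int) :
    checkY key lock x ys
      = ys.any (fun y => checkXX key lock x y (PySem.List.pyRange 0 (lock.length : Int) 1)) := by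
  induction ys with
  | nil => rfl
  | cons h t ih =>
    simp only [checkY, List.any_cons, ih]
    by_cases hc : checkXX key lock x h (PySem.List.pyRange 0 (lock.length : Int) 1) = true <;> simp [hc]

theorem checkX_eq_any (key lock : List (List Int)) (xs : List Int) :
    checkX key lock xs
      = xs.any (fun x => checkY key lock x
          (PySem.List.pyRange 0 ((key.length : Int) - (lock.length : Int) + 1) 1)) := by
  induction xs with
  | nil => rfl
  | cons h t ih =>
    simp only [checkX, List.any_cons, ih]
    by_cases hc : checkY key lock h (PySem.List.pyRange 0 ((key.length : Int) - (lock.length : Int) + 1) 1) = true <;> simp [hc]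

-- membership through a fold whose step adds elements characterized by Q
theorem mem_foldl_step {α β : Type} (g : PySem.Set β → α → PySem.Set β) (p : β) (Q : α → Prop)
    (h : ∀ s a, p ∈ g s a ↔ p ∈ s ∨ Q a) :
    ∀ (l : List α) (s : PySem.Set β), (p ∈ l.foldl g s) ↔ p ∈ s ∨ ∃ a ∈ l, Q a := by
  intro l
  induction l with
  | nil => simp
  | cons a t ih =>
    intro s
    simp only [List.foldl_cons, ih, h, List.mem_cons]
    constructor
    · rintro ((hs | hq) | ⟨b, hb, hqb⟩)
      · exact Or.inl hs
      · exact Or.inr ⟨a, Or.inl rfl, hq⟩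
      · exact Or.inr ⟨b, Or.inr hb, hqb⟩
    · rintro (hs | ⟨b, (rfl | hb), hqb⟩)
      · exact Or.inl (Or.inl hs)
      · exact Or.inl (Or.inr hqb)
      · exact Or.inr ⟨b, hb, hqb⟩

-- membership through the innermost conditional add
theorem mem_foldl_ite_add {α : Type} [BEq α] [LawfulBEq α] (c : Int → Prop) [DecidablePred c]
    (f : Int → α) (p : α) (l : List Int) (s : PySem.Set α) :
    (p ∈ l.foldl (fun s y => if c y then PySem.Set.add s (f y) else s) s)
      ↔ p ∈ s ∨ ∃ y ∈ l, c y ∧ p = f y := by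
  rw [mem_foldl_step _ p (fun y => c y ∧ p = f y)]
  intro s a
  by_cases hc : c a
  · simp [hc, PySem.Set.mem_add]
  · simp [hc]

-- what the marking pass contains
theorem mem_badSet (key lock : List (List Int)) (m k : Int) (p : Int × Int) :
    p ∈ badSet key lock m k
      ↔ ∃ xx ∈ PySem.List.pyRange 0 m 1, ∃ x ∈ PySem.List.pyRange 0 k 1,
          ∃ yy ∈ PySem.List.pyRange 0 m 1, ∃ y ∈ PySem.List.pyRange 0 k 1,
            (pvCell key (x + xx) (y + yy) ≠ 1 - pvCell lock xx yy) ∧ p = (x, y) := by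
  unfold badSet
  rw [mem_foldl_step _ p
    (fun xx => ∃ x ∈ PySem.List.pyRange 0 k 1, ∃ yy ∈ PySem.List.pyRange 0 m 1,
      ∃ y ∈ PySem.List.pyRange 0 k 1,
        (pvCell key (x + xx) (y + yy) ≠ 1 - pvCell lock xx yy) ∧ p = (x, y))]
  · simp [PySem.Set.empty]
  intro s xx
  rw [mem_foldl_step _ p
    (fun x => ∃ yy ∈ PySem.List.pyRange 0 m 1, ∃ y ∈ PySem.List.pyRange 0 k 1,
      (pvCell key (x + xx) (y + yy) ≠ 1 - pvCell lock xx yy) ∧ p = (x, y))]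
  intro s x
  rw [mem_foldl_step _ p
    (fun yy => ∃ y ∈ PySem.List.pyRange 0 k 1,
      (pvCell key (x + xx) (y + yy) ≠ 1 - pvCell lock xx yy) ∧ p = (x, y))]
  intro s yy
  simp only [pvCell]
  exact mem_foldl_ite_add
    (fun y => PySem.List.pyGetD (PySem.List.pyGetD key (x + xx) []) (y + yy) 0
        ≠ 1 - PySem.List.pyGetD (PySem.List.pyGetD lock xx []) yy 0)
    (fun y => (x, y)) p _ s

-- pointwise congruence for any restricted to members
theorem pvAnyCongrMem {α : Type} {l : List α} {f g : α → Bool} (h : ∀ a ∈ l, f a = g a) :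
    l.any f = l.any g := by
  induction l with
  | nil => rfl
  | cons a t ih =>
    simp only [List.any_cons, h a (by simp), ih (fun b hb => h b (by simp [hb]))]

-- ===== VERDICT (by name: the statement is the Claim_ definition above) =====
theorem check_spec : Claim_equal_check := by
  intro key lock _hdom _hpre
  unfold Spec_check check check_alt
  simp only []
  set m : Int := (lock.length : Int) with hm
  set k : Int := (key.length : Int) - m + 1 with hk
  by_cases hk0 : k ≤ 0
  · rw [if_pos hk0, PySem.List.pyRange_one_eq_nil (by omega)]
    rfl
  · rw [if_neg hk0, checkX_eq_any]
    apply pvAnyCongrMem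
    intro x hx
    rw [checkY_eq_any]
    apply pvAnyCongrMem
    intro y hy
    rw [checkXX_eq_all]
    rw [Bool.eq_iff_iff, List.all_eq_true, Bool.not_eq_eq_eq_not, Bool.not_true,
      Bool.eq_false_iff, Ne, PySem.Set.contains_iff, mem_badSet]
    constructor
    · intro hall hmem
      obtain ⟨xx, hxx, x', hx', yy, hyy, y', hy', hne, hp⟩ := hmem
      obtain ⟨rfl, rfl⟩ : x' = x ∧ y' = y := by
        constructor <;> [exact congrArg Prod.fst hp.symm; exact congrArg Prod.snd hp.symm]
      have := hall xx hxx
      rw [checkYY_eq_all, List.all_eq_true] at this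
      have := this yy hyy
      rw [beq_iff_eq] at this
      omega
    · intro hnomem xx hxx
      rw [checkYY_eq_all, List.all_eq_true]
      intro yy hyy
      rw [beq_iff_eq]
      by_contra hne
      exact hnomem ⟨xx, hxx, x, hx, yy, hyy, y, hy, by omega, rfl⟩
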